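-- pv_equiv track=rewrite | github.com/twannylvsmusic-maker/Wordsearch-generator | utils/shape_masks.py | create_hexagon_mask
-- ===== SOURCE A (Python) =====
-- def create_hexagon_mask(size):
--     """Create a hexagon-shaped mask."""
--     mask = []
--     center = size // 2
--
--     for i in range(size):
--         row = []
--         for j in range(size):
--             x = j - center
--             y = center - i
--
--             # Hexagon: |x| <= center and |y| <= center and |x + y| <= center
--             if abs(x) <= center and abs(y) <= center and abs(x + y) <= center:
--                 row.append(True)
--             else:
--                 row.append(False)
--         mask.append(row)
--
--     return mask
-- ===== SOURCE B (Python) =====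
-- def create_hexagon_mask(size):
--     """Create a hexagon-shaped mask (per-row interval arithmetic)."""
--     mask = []
--     center = size // 2
--     for i in range(size):
--         y = center - i
--         lo = max(0, -y)
--         hi = min(size - 1, 2 * center - max(0, y))
--         if hi < lo:
--             mask.append([False] * size)
--         else:
--             mask.append([False] * lo + [True] * (hi - lo + 1) + [False] * (size - 1 - hi))
--     return mask
-- ===== Notes on version B (the rewrite author's own statement) =====
-- stated objective: faster
-- what changed: Replaces the per-cell triple-abs test with per-row interval arithmetic: each row's True run [lo,hi] is computed once and the row is built from three list-repetition runs.
import Mathlib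
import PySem

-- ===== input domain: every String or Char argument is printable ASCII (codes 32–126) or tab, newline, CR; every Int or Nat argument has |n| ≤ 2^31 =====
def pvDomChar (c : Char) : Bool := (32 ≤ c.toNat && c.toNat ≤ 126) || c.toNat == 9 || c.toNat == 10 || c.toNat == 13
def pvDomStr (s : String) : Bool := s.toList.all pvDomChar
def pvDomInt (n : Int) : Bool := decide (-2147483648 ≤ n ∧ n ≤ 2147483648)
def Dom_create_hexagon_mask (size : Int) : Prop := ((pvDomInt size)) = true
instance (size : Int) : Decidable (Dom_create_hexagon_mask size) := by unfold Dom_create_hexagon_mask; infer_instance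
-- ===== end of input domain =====

-- B builds each row from one interval [lo,hi] of True columns instead of testing the
-- three abs-constraints at every cell (objective: faster by a constant factor).

-- ===== PORT A =====
def create_hexagon_mask (size : Int) : List (List Bool) :=
  let center := PySem.Int.floordiv size 2
  (PySem.List.pyRange 0 size 1).foldl (fun mask i =>
    let row := (PySem.List.pyRange 0 size 1).foldl (fun row j =>
      let x := j - center
      let y := center - i
      if |x| ≤ center ∧ |y| ≤ center ∧ |x + y| ≤ center then
        row ++ [true]
      else
        row ++ [false]) ([] : List Bool)
    mask ++ [row]) []

-- ===== PORT B =====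
def create_hexagon_mask_alt (size : Int) : List (List Bool) :=
  let center := PySem.Int.floordiv size 2
  (PySem.List.pyRange 0 size 1).foldl (fun mask i =>
    let y := center - i
    let lo := max 0 (-y)
    let hi := min (size - 1) (2 * center - max 0 y)
    if hi < lo then
      mask ++ [List.replicate size.toNat false]
    else
      mask ++ [List.replicate lo.toNat false ++ List.replicate (hi - lo + 1).toNat true
                 ++ List.replicate (size - 1 - hi).toNat false]) []

-- ===== PRECONDITION & SPEC =====
def Spec_create_hexagon_mask (size : Int) (out : List (List Bool)) : Prop := out = create_hexagon_mask_alt size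
instance (size : Int) (out : List (List Bool)) : Decidable (Spec_create_hexagon_mask size out) := by unfold Spec_create_hexagon_mask; infer_instance

-- ===== CLAIM (what is proved, stated in full; the proofs are below) =====
def Claim_equal_create_hexagon_mask : Prop := ∀ (size : Int), Dom_create_hexagon_mask size → Spec_create_hexagon_mask size (create_hexagon_mask size)

-- ===== LEMMAS AND PROOFS =====

-- a map over a range on which g is constant is a replicate
lemma map_pyRange_const (a b : Int) (v : Bool) (g : Int → Bool)
    (h : ∀ x, a ≤ x → x < b → g x = v) :
    (PySem.List.pyRange a b 1).map g = List.replicate (b - a).toNat v := by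
  rw [List.eq_replicate_iff]
  refine ⟨by simp, ?_⟩
  intro c hc
  obtain ⟨x, hx, rfl⟩ := List.mem_map.1 hc
  rw [PySem.List.mem_pyRange_one] at hx
  exact h x hx.1 hx.2

-- the rows agree for every i produced by the outer loop
lemma row_eq (size i : Int) (hi0 : 0 ≤ i) (hiN : i < size) :
    (PySem.List.pyRange 0 size 1).foldl (fun row j => row ++ [
      if |j - PySem.Int.floordiv size 2| ≤ PySem.Int.floordiv size 2 ∧
         |PySem.Int.floordiv size 2 - i| ≤ PySem.Int.floordiv size 2 ∧
         |j - PySem.Int.floordiv size 2 + (PySem.Int.floordiv size 2 - i)| ≤ PySem.Int.floordiv size 2 then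
        true else false]) [] =
    (if min (size - 1) (2 * PySem.Int.floordiv size 2 - max 0 (PySem.Int.floordiv size 2 - i))
          < max 0 (-(PySem.Int.floordiv size 2 - i)) then
       List.replicate size.toNat false
     else
       List.replicate (max 0 (-(PySem.Int.floordiv size 2 - i))).toNat false ++
       List.replicate (min (size - 1) (2 * PySem.Int.floordiv size 2 - max 0 (PySem.Int.floordiv size 2 - i))
                        - max 0 (-(PySem.Int.floordiv size 2 - i)) + 1).toNat true ++
       List.replicate (size - 1
                        - min (size - 1) (2 * PySem.Int.floordiv size 2 - max 0 (PySem.Int.floordiv size 2 - i))).toNat false) := by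
  have hcdiv : PySem.Int.floordiv size 2 = size / 2 :=
    PySem.Int.floordiv_eq_ediv_of_pos (by omega : (0:Int) < 2)
  rw [hcdiv]
  set c := size / 2 with hc
  have hc2 : 2 * c ≤ size ∧ size ≤ 2 * c + 1 := by omega
  set lo := max 0 (-(c - i)) with hlo
  set hgh := min (size - 1) (2 * c - max 0 (c - i)) with hhgh
  have hlo0 : 0 ≤ lo := by omega
  have hlohi : lo ≤ hgh := by omega
  have hhghN : hgh < size := by omega
  rw [if_neg (by omega)]
  rw [PySem.List.foldl_append_singleton_eq_map, List.nil_append]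
  rw [PySem.List.pyRange_one_append 0 lo size (by omega) (by omega),
      PySem.List.pyRange_one_append lo (hgh + 1) size (by omega) (by omega),
      List.map_append, List.map_append]
  rw [map_pyRange_const 0 lo false _ (by
        intro x hx1 hx2
        rw [if_neg]
        simp only [abs_le]
        omega),
      map_pyRange_const lo (hgh + 1) true _ (by
        intro x hx1 hx2
        rw [if_pos]
        simp only [abs_le]
        omega),
      map_pyRange_const (hgh + 1) size false _ (by
        intro x hx1 hx2
        rw [if_neg]
        simp only [abs_le]
        omega)]
  rw [show (lo : Int) - 0 = lo from by ring,
      show (hgh : Int) + 1 - lo = hgh - lo + 1 from by ring,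
      show (size : Int) - (hgh + 1) = size - 1 - hgh from by ring, List.append_assoc]

-- push the branch-dependent append through the if, at both loop levels
lemma ite_append_singleton {α : Type} (c : Prop) [Decidable c] (acc : List α) (x y : α) :
    (if c then acc ++ [x] else acc ++ [y]) = acc ++ [if c then x else y] := by
  split <;> rfl

-- ===== VERDICT (by name: the statement is the Claim_ definition above) =====
theorem create_hexagon_mask_spec : Claim_equal_create_hexagon_mask := by
  intro size _
  unfold Spec_create_hexagon_mask create_hexagon_mask create_hexagon_mask_alt
  simp only [ite_append_singleton]
  rw [PySem.List.foldl_append_singleton_eq_map, PySem.List.foldl_append_singleton_eq_map,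
      List.nil_append, List.nil_append]
  apply List.map_congr_left
  intro i hi
  rw [PySem.List.mem_pyRange_one] at hi
  exact row_eq size i hi.1 hi.2
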